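-- pv_equiv track=rewrite | github.com/natyfbg/NFG | backend/app.py | _week_unlock_map
-- ===== SOURCE A (Python) =====
-- from typing import Dict, List, Optional, Tuple
--
-- def _ordered_week_numbers(weeks: List[dict]) -> List[int]:
--     def _as_int(val) -> int:
--         try:
--             return int(val)
--         except Exception:
--             return 0
--
--     ordered: List[int] = []
--     seen = set()
--     for w in sorted(
--         weeks,
--         key=lambda row: (_as_int(row.get("week_number")), _as_int(row.get("order"))),
--     ):
--         wn = _as_int(w.get("week_number"))
--         if wn < 1 or wn in seen:
--             continue
--         seen.add(wn)
--         ordered.append(wn)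
--     return ordered
--
-- def _week_unlock_map(weeks: List[dict], week_progress: dict) -> dict:
--     week_numbers = _ordered_week_numbers(weeks)
--     unlock_map = {}
--     all_previous_complete = True
--
--     for idx, wn in enumerate(week_numbers):
--         unlock_map[wn] = idx == 0 or all_previous_complete
--
--         pg = week_progress.get(wn) or {}
--         total = int(pg.get("total") or 0)
--         done = int(pg.get("done") or 0)
--         complete_for_unlock = (total == 0) or (done >= total)
--         all_previous_complete = all_previous_complete and complete_for_unlock
--
--     return unlock_map
-- ===== SOURCE B (Python) =====
-- from typing import Dict, List, Optional, Tuple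
--
-- def _ordered_week_numbers(weeks: List[dict]) -> List[int]:
--     def _as_int(val) -> int:
--         try:
--             return int(val)
--         except Exception:
--             return 0
--
--     ordered: List[int] = []
--     seen = set()
--     for w in sorted(
--         weeks,
--         key=lambda row: (_as_int(row.get("week_number")), _as_int(row.get("order"))),
--     ):
--         wn = _as_int(w.get("week_number"))
--         if wn < 1 or wn in seen:
--             continue
--         seen.add(wn)
--         ordered.append(wn)
--     return ordered
--
-- def _week_unlock_map(weeks: List[dict], week_progress: dict) -> dict:
--     week_numbers = _ordered_week_numbers(weeks)
--
--     def _complete_for_unlock(wn: int) -> bool: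
--         pg = week_progress.get(wn) or {}
--         total = int(pg.get("total") or 0)
--         done = int(pg.get("done") or 0)
--         return total == 0 or done >= total
--
--     cutoff = len(week_numbers)
--     for i, wn in enumerate(week_numbers):
--         if not _complete_for_unlock(wn):
--             cutoff = i
--             break
--
--     return {wn: i <= cutoff for i, wn in enumerate(week_numbers)}
-- ===== Notes on version B (the rewrite author's own statement) =====
-- stated objective: alternative
-- what changed: Replaces the single pass that threads a running all_previous_complete boolean while mutating the dict with a two-phase computation: first find cutoff, the index of the first week not complete-for-unlock (len if none), then emit unlock flags as idx <= cutoff.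
import Mathlib
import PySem

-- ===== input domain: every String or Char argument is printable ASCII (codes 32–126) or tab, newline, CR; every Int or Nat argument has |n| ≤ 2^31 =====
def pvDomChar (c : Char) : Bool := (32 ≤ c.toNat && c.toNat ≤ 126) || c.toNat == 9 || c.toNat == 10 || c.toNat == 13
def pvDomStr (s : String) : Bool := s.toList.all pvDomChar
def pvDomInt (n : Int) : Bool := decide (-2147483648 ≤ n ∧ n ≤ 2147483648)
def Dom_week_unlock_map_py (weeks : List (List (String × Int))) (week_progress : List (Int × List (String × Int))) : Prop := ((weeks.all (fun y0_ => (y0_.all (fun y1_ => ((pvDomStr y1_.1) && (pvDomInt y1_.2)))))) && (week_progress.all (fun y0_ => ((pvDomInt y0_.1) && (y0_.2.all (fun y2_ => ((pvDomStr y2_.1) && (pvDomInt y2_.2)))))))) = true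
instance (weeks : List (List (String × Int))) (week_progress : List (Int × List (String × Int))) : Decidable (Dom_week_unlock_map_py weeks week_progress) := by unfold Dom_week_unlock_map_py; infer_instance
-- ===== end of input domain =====

-- B replaces A's running all_previous_complete boolean by a first pass computing the cutoff index
-- (first incomplete week) and a second pass emitting idx <= cutoff; objective: alternative decomposition.

-- ===== PORT A =====
-- _as_int(row.get(k)): int(None) raises -> except -> 0; int on a dict's Int value is the identity.
def pyAsInt (row : List (String × Int)) (k : String) : Int :=
  ((PySem.Dict.ofList row).get? k).getD 0

-- _ordered_week_numbers: identical helper in Source A and Source B, shared by both ports.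
def orderedWeekNumbers (weeks : List (List (String × Int))) : List Int :=
  ((PySem.List.sorted2 weeks (fun row => pyAsInt row "week_number") (fun row => pyAsInt row "order")).foldl
    (fun (st : List Int × PySem.Set Int) w =>
      let wn := pyAsInt w "week_number"
      if wn < 1 ∨ st.2.contains wn then st
      else (st.1 ++ [wn], st.2.add wn)) ([], PySem.Set.empty)).1

def week_unlock_map_py (weeks : List (List (String × Int))) (week_progress : List (Int × List (String × Int))) : List (Int × Bool) :=
  let week_numbers := orderedWeekNumbers weeks
  (((PySem.List.enumerate week_numbers).foldl
    (fun (st : PySem.Dict Int Bool × Bool) p =>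
      let m := PySem.Dict.insert st.1 p.2 (p.1 == 0 || st.2)
      -- week_progress.get(wn) or {} : an absent key and a stored empty dict both give {}.
      let pg := ((PySem.Dict.ofList week_progress).get? p.2).getD []
      -- int(pg.get("total") or 0) : absent -> 0, stored 0 -> 0, otherwise the stored Int itself.
      let total := ((PySem.Dict.ofList pg).get? "total").getD 0
      let done := ((PySem.Dict.ofList pg).get? "done").getD 0
      let complete := (total == 0) || decide (done ≥ total)
      (m, st.2 && complete)) (PySem.Dict.empty, true)).1).items

-- ===== PORT B =====
def completeForUnlock (week_progress : List (Int × List (String × Int))) (wn : Int) : Bool :=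
  let pg := ((PySem.Dict.ofList week_progress).get? wn).getD []
  let total := ((PySem.Dict.ofList pg).get? "total").getD 0
  let done := ((PySem.Dict.ofList pg).get? "done").getD 0
  (total == 0) || decide (done ≥ total)

-- the for+break loop of B: returns the index of the first incomplete week, or the end index.
def findCutoff (week_progress : List (Int × List (String × Int))) : List Int → Int → Int
  | [], i => i
  | wn :: rest, i => if completeForUnlock week_progress wn then findCutoff week_progress rest (i + 1) else i

def week_unlock_map_py_alt (weeks : List (List (String × Int))) (week_progress : List (Int × List (String × Int))) : List (Int × Bool) :=
  let week_numbers := orderedWeekNumbers weeks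
  let cutoff := findCutoff week_progress week_numbers 0
  -- dict comprehension over the (duplicate-free) ordered week numbers
  (PySem.List.enumerate week_numbers).map (fun p => (p.2, decide (p.1 ≤ cutoff)))

-- ===== PRECONDITION & SPEC =====
def Spec_week_unlock_map_py (weeks : List (List (String × Int))) (week_progress : List (Int × List (String × Int))) (out : List (Int × Bool)) : Prop := out = week_unlock_map_py_alt weeks week_progress
instance (weeks : List (List (String × Int))) (week_progress : List (Int × List (String × Int))) (out : List (Int × Bool)) : Decidable (Spec_week_unlock_map_py weeks week_progress out) := by unfold Spec_week_unlock_map_py; infer_instance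

-- ===== CLAIM (what is proved, stated in full; the proofs are below) =====
def Claim_equal_week_unlock_map_py : Prop := ∀ (weeks : List (List (String × Int))) (week_progress : List (Int × List (String × Int))), Dom_week_unlock_map_py weeks week_progress → Spec_week_unlock_map_py weeks week_progress (week_unlock_map_py weeks week_progress)

-- ===== LEMMAS AND PROOFS =====

-- pure reading of A's running-boolean pass, used as the bridge between the two ports
def flagsF (wp : List (Int × List (String × Int))) (b : Bool) : List Int → List (Int × Bool)
  | [] => []
  | wn :: rest => (wn, b) :: flagsF wp (b && completeForUnlock wp wn) rest

theorem orderedWeekNumbers_nodup (weeks : List (List (String × Int))) :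
    (orderedWeekNumbers weeks).Nodup := by
  unfold orderedWeekNumbers
  generalize (PySem.List.sorted2 weeks (fun row => pyAsInt row "week_number") (fun row => pyAsInt row "order")) = l
  suffices h : ∀ (st : List Int × PySem.Set Int),
      st.1.Nodup → (∀ x ∈ st.1, x ∈ st.2) →
      (l.foldl (fun (st : List Int × PySem.Set Int) w =>
        let wn := pyAsInt w "week_number"
        if wn < 1 ∨ st.2.contains wn then st
        else (st.1 ++ [wn], st.2.add wn)) st).1.Nodup by
    exact h ([], PySem.Set.empty) List.nodup_nil (by intro x hx; simp at hx)
  induction l with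
  | nil => intro st h1 _; simpa using h1
  | cons w rest ih =>
    intro st h1 h2
    rw [List.foldl_cons]
    refine ih _ ?_ ?_
    · show (if pyAsInt w "week_number" < 1 ∨ (st.2.contains (pyAsInt w "week_number")) = true then st
          else (st.1 ++ [pyAsInt w "week_number"], st.2.add (pyAsInt w "week_number"))).1.Nodup
      split
      · exact h1
      next hc =>
        have hnm : pyAsInt w "week_number" ∉ st.2 := by
          have := (not_or.mp hc).2
          simpa [PySem.Set.contains] using this
        rw [List.nodup_append]
        refine ⟨h1, by simp, fun x hx y hy => ?_⟩
        rw [List.mem_singleton] at hy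
        subst hy
        exact fun h => hnm (h ▸ h2 x hx)
    · show ∀ x ∈ (if pyAsInt w "week_number" < 1 ∨ (st.2.contains (pyAsInt w "week_number")) = true then st
          else (st.1 ++ [pyAsInt w "week_number"], st.2.add (pyAsInt w "week_number"))).1,
        x ∈ (if pyAsInt w "week_number" < 1 ∨ (st.2.contains (pyAsInt w "week_number")) = true then st
          else (st.1 ++ [pyAsInt w "week_number"], st.2.add (pyAsInt w "week_number"))).2
      split
      · exact h2
      · intro x hx
        simp only [List.mem_append, List.mem_singleton] at hx
        rw [PySem.Set.mem_add]
        rcases hx with hx | hx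
        · exact Or.inl (h2 x hx)
        · exact Or.inr hx

theorem foldA_eq (wp : List (Int × List (String × Int))) (wns : List Int) :
    ∀ (s : Int) (d : PySem.Dict Int Bool) (b : Bool),
      (1 ≤ s ∨ (s = 0 ∧ b = true)) → (∀ wn ∈ wns, d.contains wn = false) → wns.Nodup →
      ((PySem.List.enumerate wns s).foldl
        (fun (st : PySem.Dict Int Bool × Bool) p =>
          let m := PySem.Dict.insert st.1 p.2 (p.1 == 0 || st.2)
          let pg := ((PySem.Dict.ofList wp).get? p.2).getD []
          let total := ((PySem.Dict.ofList pg).get? "total").getD 0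
          let done := ((PySem.Dict.ofList pg).get? "done").getD 0
          let complete := (total == 0) || decide (done ≥ total)
          (m, st.2 && complete)) (d, b)).1.items = d.items ++ flagsF wp b wns := by
  induction wns with
  | nil => intro s d b _ _ _; simp [PySem.List.enumerate, flagsF]
  | cons wn rest ih =>
    intro s d b hs hfresh hnd
    rw [PySem.List.enumerate_cons, List.foldl_cons]
    have hflag : ((s == 0) || b) = b := by
      rcases hs with hs | ⟨_, hb⟩
      · have : (s == 0) = false := by simp; omega
        simp [this]
      · simp [hb]
    have hfw : d.contains wn = false := hfresh wn (by simp)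
    have hins : (PySem.Dict.insert d wn ((s == 0) || b)).items = d.items ++ [(wn, b)] := by
      simp [PySem.Dict.insert, hfw, hflag]
    have hfresh' : ∀ x ∈ rest, (PySem.Dict.insert d wn ((s == 0) || b)).contains x = false := by
      intro x hx
      have hne : x ≠ wn := by
        rintro rfl; exact (List.nodup_cons.mp hnd).1 hx
      have hxd : d.contains x = false := hfresh x (by simp [hx])
      simp only [PySem.Dict.contains] at hxd ⊢
      rw [hins]
      simp only [List.any_append, Bool.or_eq_false_iff]
      refine ⟨hxd, by simp [Ne.symm hne]⟩
    have hrec := ih (s + 1) (PySem.Dict.insert d wn ((s == 0) || b))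
      (b && completeForUnlock wp wn)
      (Or.inl (by rcases hs with hs | ⟨hs0, _⟩ <;> omega)) hfresh' (List.nodup_cons.mp hnd).2
    simp only [completeForUnlock] at hrec
    simp only [flagsF]
    simpa [hins, List.append_assoc, completeForUnlock] using hrec

theorem flagsF_false (wp : List (Int × List (String × Int))) (wns : List Int) :
    flagsF wp false wns = wns.map (fun wn => (wn, false)) := by
  induction wns with
  | nil => rfl
  | cons wn rest ih => simp [flagsF, ih]

theorem findCutoff_ge (wp : List (Int × List (String × Int))) (wns : List Int) :
    ∀ s : Int, s ≤ findCutoff wp wns s := by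
  induction wns with
  | nil => intro s; simp [findCutoff]
  | cons wn rest ih =>
    intro s
    rw [findCutoff]
    by_cases hc : completeForUnlock wp wn = true
    · rw [if_pos hc]; have := ih (s + 1); omega
    · rw [if_neg hc]

theorem map_le_lt (wns : List Int) :
    ∀ (s c : Int), c < s →
      (PySem.List.enumerate wns s).map (fun p => (p.2, decide (p.1 ≤ c)))
        = wns.map (fun wn => (wn, false)) := by
  induction wns with
  | nil => intro s c _; simp [PySem.List.enumerate]
  | cons wn rest ih =>
    intro s c h
    rw [PySem.List.enumerate_cons, List.map_cons, ih (s + 1) c (by omega)]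
    have : decide (s ≤ c) = false := by simp; omega
    simp [this]

theorem foldB_eq (wp : List (Int × List (String × Int))) (wns : List Int) :
    ∀ s : Int,
      (PySem.List.enumerate wns s).map (fun p => (p.2, decide (p.1 ≤ findCutoff wp wns s)))
        = flagsF wp true wns := by
  induction wns with
  | nil => intro s; simp [PySem.List.enumerate, flagsF]
  | cons wn rest ih =>
    intro s
    rw [PySem.List.enumerate_cons, findCutoff]
    simp only [List.map_cons, flagsF, Bool.true_and]
    by_cases hc : completeForUnlock wp wn = true
    · rw [if_pos hc, hc]
      have hge := findCutoff_ge wp rest (s + 1)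
      have hhead : decide (s ≤ findCutoff wp rest (s + 1)) = true := by simp; omega
      rw [hhead, ih (s + 1)]
    · have hcf : completeForUnlock wp wn = false := by simpa using hc
      rw [if_neg hc, hcf]
      rw [map_le_lt rest (s + 1) s (by omega), flagsF_false]
      simp

-- ===== VERDICT (by name: the statement is the Claim_ definition above) =====
theorem week_unlock_map_py_spec : Claim_equal_week_unlock_map_py := by
  intro weeks wp _
  unfold Spec_week_unlock_map_py week_unlock_map_py week_unlock_map_py_alt
  have hA := foldA_eq wp (orderedWeekNumbers weeks) 0 PySem.Dict.empty true
    (Or.inr ⟨rfl, rfl⟩) (by intro wn _; simp [PySem.Dict.contains, PySem.Dict.empty])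
    (orderedWeekNumbers_nodup weeks)
  have hB := foldB_eq wp (orderedWeekNumbers weeks) 0
  rw [hA, hB]
  simp [PySem.Dict.empty]
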